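-- pv_equiv track=rewrite | github.com/Mouzone/Python-Summer | Nuclear Word Swap.py | nuclearProtocol
-- ===== SOURCE A (Python) =====
-- def nuclearProtocol(mainString, takeOut, swapIn, noMercy):
--
--     length = len(takeOut)
--     i = 0 # position currently in the mainString
--
--     while i <= len(mainString): # simplfies it as increment will also be position
--
--         # checks if from the current position to the length of the target word is the target word
--         # this works bc i+length will go one over, but indices don't include the last position
--         if mainString[ i : i + length ] == takeOut:
--
--             # if before is true this takes the past before it and concatenates new word in middle
--             # and adds the rest of the string
--             # the string will be put back into the loop and acted upon
--             mainString = mainString[ 0 : i ] + swapIn + mainString[ i + length : len(mainString)]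
--             # to prevent rechecking and the possibility of takeOut and swapIn being different lengths
--             # the loop continues at the position where the rest of the string is
--             i += len(swapIn)
--
--         if noMercy == "Y":
--
--             if mainString[ i : i + length ] == takeOut.capitalize():
--
--                 mainString = mainString[ 0 : i ] + swapIn + mainString[ i + length : len(mainString) ]
--
--                 i += len(swapIn)
--
--         i += 1
--
--     return mainString
-- ===== SOURCE B (Python) =====
-- def nuclearProtocol(mainString, takeOut, swapIn, noMercy):
--     # Single left-to-right pass over the original string by index, emitting into a
--     # buffer joined once at the end: no string is ever rebuilt or sliced off.
--     length = len(takeOut)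
--     cap = takeOut.capitalize()
--     merciless = (noMercy == "Y")
--     n = len(mainString)
--     out = []
--     j = 0
--     while True:
--         if mainString.startswith(takeOut, j):
--             out.append(swapIn)
--             j += length
--         if merciless and mainString.startswith(cap, j):
--             out.append(swapIn)
--             j += length
--         if j >= n:
--             break
--         out.append(mainString[j])
--         j += 1
--     return "".join(out)
-- ===== Notes on version B (the rewrite author's own statement) =====
-- stated objective: faster
-- what changed: B replaces A's loop that re-slices and rebuilds the whole string on every replacement (and re-indexes into the rebuilt string) by a single left-to-right pass that keeps only the unprocessed suffix, emits pieces into a buffer and joins once at the end.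
import Mathlib
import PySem

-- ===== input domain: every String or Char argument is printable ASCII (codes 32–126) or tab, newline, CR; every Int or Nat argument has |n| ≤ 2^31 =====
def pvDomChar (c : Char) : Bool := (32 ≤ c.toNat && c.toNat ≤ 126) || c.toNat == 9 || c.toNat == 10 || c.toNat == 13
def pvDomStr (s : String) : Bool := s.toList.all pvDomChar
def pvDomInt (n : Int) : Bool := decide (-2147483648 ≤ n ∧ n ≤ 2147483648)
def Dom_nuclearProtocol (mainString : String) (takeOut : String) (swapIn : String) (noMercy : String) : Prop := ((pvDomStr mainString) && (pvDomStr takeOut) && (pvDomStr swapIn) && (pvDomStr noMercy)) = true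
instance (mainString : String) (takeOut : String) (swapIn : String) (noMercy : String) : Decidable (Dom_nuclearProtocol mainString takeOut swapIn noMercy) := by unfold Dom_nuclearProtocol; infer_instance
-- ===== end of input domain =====

-- B replaces A's index-into-a-rebuilt-string loop by a single left-to-right pass over
-- the unprocessed suffix, emitting pieces into a buffer joined once at the end (objective: faster).

-- str.capitalize(): first char uppercased, the rest lowercased (exact on ASCII, which Dom guarantees)
def pyCapitalize (l : List Char) : List Char :=
  match l with
  | [] => []
  | c :: cs => PySem.Chars.upperChar c :: PySem.Chars.lower cs

-- ===== PORT A =====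
-- One if-block of A's loop body (the two blocks are textually identical up to the target
-- string): if mainString[i:i+length] == target, splice swapIn in and advance i by len(swapIn).
-- A uses length = len(takeOut) in both blocks; here target.length, equal also in the second
-- block since capitalize preserves length.
def stepCheckA (target swapIn : List Char) (si : List Char × Nat) : List Char × Nat :=
  if PySem.List.slice si.1 (some (si.2 : Int)) (some ((si.2 : Int) + (target.length : Int))) = target then
    (PySem.List.slice si.1 (some 0) (some (si.2 : Int)) ++ swapIn ++
       PySem.List.slice si.1 (some ((si.2 : Int) + (target.length : Int))) (some (si.1.length : Int)),
     si.2 + swapIn.length)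
  else si

-- needed by loopA's termination: the splice never increases the unprocessed length, and i stays in range
theorem stepCheckA_bound (target swapIn : List Char) (si : List Char × Nat) (h : si.2 ≤ si.1.length) :
    (stepCheckA target swapIn si).2 ≤ (stepCheckA target swapIn si).1.length ∧
    (stepCheckA target swapIn si).1.length - (stepCheckA target swapIn si).2 ≤ si.1.length - si.2 := by
  obtain ⟨s, i⟩ := si
  simp only at h
  unfold stepCheckA
  simp only
  split
  · rename_i hm
    rw [show (i : Int) + (target.length : Int) = ((i + target.length : Nat) : Int) by push_cast; ring]
      at hm ⊢
    rw [PySem.List.slice_natCast] at hm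
    have hlen : target.length ≤ s.length - i := by
      have := congrArg List.length hm
      simp at this
      omega
    rw [PySem.List.slice_zero_start, PySem.List.slice_to_natCast, PySem.List.slice_natCast]
    simp
    omega
  · exact ⟨h, le_rfl⟩

-- A's while-loop: i walks the (mutating) string; while i <= len(mainString), try the
-- takeOut splice, then (if noMercy == "Y") the capitalized splice, then i += 1.
def nuclearLoopA (takeOut swapIn : List Char) (merc : Bool) (s : List Char) (i : Nat) : List Char :=
  if h : i ≤ s.length then
    let p := stepCheckA takeOut swapIn (s, i)
    let q := if merc then stepCheckA (pyCapitalize takeOut) swapIn p else p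
    nuclearLoopA takeOut swapIn merc q.1 (q.2 + 1)
  else s
termination_by s.length + 1 - i
decreasing_by
  have h1 := stepCheckA_bound takeOut swapIn (s, i) (by simpa using h)
  simp at h1
  set p' := stepCheckA takeOut swapIn (s, i)
  set q' := if _h : merc = true then stepCheckA (pyCapitalize takeOut) swapIn p' else p' with hq
  have h2 : q'.2 ≤ q'.1.length ∧ q'.1.length - q'.2 ≤ s.length - i := by
    rw [hq]; split
    · have h3 := stepCheckA_bound (pyCapitalize takeOut) swapIn p' h1.1
      exact ⟨h3.1, by omega⟩
    · exact ⟨h1.1, by omega⟩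
  omega

def nuclearProtocol (mainString : String) (takeOut : String) (swapIn : String) (noMercy : String) : String :=
  String.ofList (nuclearLoopA takeOut.toList swapIn.toList (noMercy == "Y") mainString.toList 0)

-- ===== PORT B =====
-- B's loop: at index j into the untouched original string, two startswith checks on the
-- suffix (Python's mainString.startswith(t, j), exactly "t is a prefix of s[j:]" for j ≥ 0,
-- is ported by hand as startswith on List.drop j), emitting swapIn into the buffer and
-- jumping over the match; then move one character into the buffer.
def nuclearLoopB (takeOut cap swapIn : List Char) (merc : Bool) (s : List Char) (j : Nat)
    (out : List (List Char)) : List (List Char) :=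
  let j1 := if PySem.Chars.startswith (s.drop j) takeOut then j + takeOut.length else j
  let o1 := if PySem.Chars.startswith (s.drop j) takeOut then out ++ [swapIn] else out
  let j2 := if merc && PySem.Chars.startswith (s.drop j1) cap then j1 + takeOut.length else j1
  let o2 := if merc && PySem.Chars.startswith (s.drop j1) cap then o1 ++ [swapIn] else o1
  if s.length ≤ j2 then o2
  -- mainString[j2] is in bounds here (j2 < len), so plain indexing is exact
  else nuclearLoopB takeOut cap swapIn merc s (j2 + 1) (o2 ++ [[(s.drop j2).headI]])
termination_by s.length - j
decreasing_by
  rename_i hguard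
  simp only [j2, j1] at hguard ⊢
  split_ifs at hguard ⊢ <;> omega

def nuclearProtocol_alt (mainString : String) (takeOut : String) (swapIn : String) (noMercy : String) : String :=
  String.ofList (PySem.Chars.join []
    (nuclearLoopB takeOut.toList (pyCapitalize takeOut.toList) swapIn.toList (noMercy == "Y")
      mainString.toList 0 []))

-- ===== PRECONDITION & SPEC =====
def Spec_nuclearProtocol (mainString : String) (takeOut : String) (swapIn : String) (noMercy : String) (out : String) : Prop := out = nuclearProtocol_alt mainString takeOut swapIn noMercy
instance (mainString : String) (takeOut : String) (swapIn : String) (noMercy : String) (out : String) : Decidable (Spec_nuclearProtocol mainString takeOut swapIn noMercy out) := by unfold Spec_nuclearProtocol; infer_instance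

-- ===== CLAIM (what is proved, stated in full; the proofs are below) =====
def Claim_equal_nuclearProtocol : Prop := ∀ (mainString : String) (takeOut : String) (swapIn : String) (noMercy : String), Dom_nuclearProtocol mainString takeOut swapIn noMercy → Spec_nuclearProtocol mainString takeOut swapIn noMercy (nuclearProtocol mainString takeOut swapIn noMercy)

-- ===== LEMMAS AND PROOFS =====

-- reference form of one iteration's check, phrased on the unprocessed suffix only
def coreStep (L : Nat) (target swapIn : List Char) (r : List Char) : List Char × List Char :=
  if PySem.Chars.startswith r target then (swapIn, r.drop L) else ([], r)

theorem coreStep_len_le (L target swapIn r) : ((coreStep L target swapIn r).2).length ≤ r.length := by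
  unfold coreStep; split <;> simp

-- reference recursion: what both loops compute on the unprocessed suffix
def core (takeOut cap swapIn : List Char) (merc : Bool) (rest : List Char) : List Char :=
  let p := coreStep takeOut.length takeOut swapIn rest
  let q := if merc then coreStep takeOut.length cap swapIn p.2 else ([], p.2)
  p.1 ++ q.1 ++ (if _h : q.2.isEmpty then []
    else q.2.headI :: core takeOut cap swapIn merc q.2.tail)
termination_by rest.length
decreasing_by
  have b1 : p.2.length ≤ rest.length := coreStep_len_le takeOut.length takeOut swapIn rest
  have b2 : q.2.length ≤ p.2.length := by
    simp only [q]; split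
    · exact coreStep_len_le takeOut.length cap swapIn _
    · exact le_rfl
  have hne : q.2.length ≠ 0 := by
    simpa [List.isEmpty_iff, List.length_eq_zero_iff] using _h
  simp only [q, p] at b1 b2 hne ⊢
  rw [List.length_tail]
  omega

-- join with an empty separator is flatten
theorem join_nil_flatten (l : List (List Char)) : PySem.Chars.join [] l = l.flatten := by
  show List.intercalate [] l = l.flatten
  induction l with
  | nil => simp [List.intercalate]
  | cons a l ih =>
    cases l with
    | nil => simp [List.intercalate]
    | cons b l =>
      simp [List.intercalate, List.intersperse] at *
      simpa [List.intercalate] using ih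

-- one A-side check, seen through take/drop at the current index, is one coreStep on the suffix
theorem stepCheckA_core (target swapIn : List Char) (s : List Char) (i : Nat) (h : i ≤ s.length) :
    (stepCheckA target swapIn (s, i)).2 ≤ (stepCheckA target swapIn (s, i)).1.length ∧
    (stepCheckA target swapIn (s, i)).1.take (stepCheckA target swapIn (s, i)).2
      = s.take i ++ (coreStep target.length target swapIn (s.drop i)).1 ∧
    (stepCheckA target swapIn (s, i)).1.drop (stepCheckA target swapIn (s, i)).2
      = (coreStep target.length target swapIn (s.drop i)).2 := by
  have hcast : (i : Int) + (target.length : Int) = ((i + target.length : Nat) : Int) := by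
    push_cast; ring
  have hcond : (PySem.List.slice s (some (i : Int)) (some ((i : Int) + (target.length : Int)))
      = target) ↔ PySem.Chars.startswith (s.drop i) target = true := by
    rw [hcast, PySem.List.slice_natCast, PySem.Chars.startswith_iff, List.prefix_iff_eq_take,
      Nat.add_sub_cancel_left]
    exact eq_comm
  unfold stepCheckA coreStep
  simp only
  by_cases hc : PySem.Chars.startswith (s.drop i) target = true
  · rw [if_pos (hcond.mpr hc), if_pos hc]
    have hlen : target.length ≤ s.length - i := by
      have := (PySem.Chars.startswith_iff _ _).mp hc
      have := this.length_le
      simp at this; omega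
    rw [hcast, PySem.List.slice_zero_start, PySem.List.slice_to_natCast,
      PySem.List.slice_natCast]
    have hX : (s.drop (i + target.length)).take (s.length - (i + target.length))
        = s.drop (i + target.length) := List.take_of_length_le (by simp)
    have hlenA : ((s.take i) ++ swapIn).length = i + swapIn.length := by simp; omega
    refine ⟨by simp; omega, ?_, ?_⟩
    · rw [List.append_assoc, hX, ← List.append_assoc, List.take_left' hlenA]
    · rw [List.append_assoc, hX, ← List.append_assoc, List.drop_left' hlenA,
        List.drop_drop, Nat.add_comm]
  · rw [if_neg (fun hx => hc (hcond.mp hx)), if_neg hc]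
    exact ⟨h, by simp, rfl⟩

theorem length_pyCapitalize (l : List Char) : (pyCapitalize l).length = l.length := by
  cases l <;> simp [pyCapitalize, PySem.Chars.lower]

-- A's loop, started at index i ≤ len, leaves s[:i] alone and maps s[i:] through core
theorem loopA_core (takeOut swapIn : List Char) (merc : Bool) :
    ∀ (n : Nat) (s : List Char) (i : Nat), i ≤ s.length → s.length - i ≤ n →
      nuclearLoopA takeOut swapIn merc s i
        = s.take i ++ core takeOut (pyCapitalize takeOut) swapIn merc (s.drop i) := by
  intro n
  induction n using Nat.strong_induction_on with
  | _ n ihn =>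
    intro s i hi hn
    have hA := stepCheckA_core takeOut swapIn s i hi
    have hB := stepCheckA_core (pyCapitalize takeOut) swapIn
      (stepCheckA takeOut swapIn (s, i)).1 (stepCheckA takeOut swapIn (s, i)).2 hA.1
    rw [Prod.mk.eta, length_pyCapitalize] at hB
    rw [nuclearLoopA, dif_pos hi, core]
    simp only
    set P := stepCheckA takeOut swapIn (s, i) with hPdef
    set Q := if merc = true then stepCheckA (pyCapitalize takeOut) swapIn P else P with hQdef
    set cp := coreStep takeOut.length takeOut swapIn (s.drop i) with hcpdef
    set cq := if merc = true then coreStep takeOut.length (pyCapitalize takeOut) swapIn cp.2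
      else ([], cp.2) with hcqdef
    have hQ1 : Q.2 ≤ Q.1.length := by
      rw [hQdef]; split
      · exact hB.1
      · exact hA.1
    have hQtake : Q.1.take Q.2 = s.take i ++ cp.1 ++ cq.1 := by
      rw [hQdef, hcqdef]; split
      · rw [hB.2.1, hA.2.1, hA.2.2, hcpdef, List.append_assoc]
      · rw [hA.2.1, hcpdef]; simp
    have hQdrop : Q.1.drop Q.2 = cq.2 := by
      rw [hQdef, hcqdef]; split
      · rw [hB.2.2, hA.2.2, hcpdef]
      · rw [hA.2.2, hcpdef]
    have hlq : cq.2.length ≤ s.length - i := by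
      have h1 := coreStep_len_le takeOut.length takeOut swapIn (s.drop i)
      have h2 : cq.2.length ≤ cp.2.length := by
        rw [hcqdef]; split
        · exact coreStep_len_le takeOut.length (pyCapitalize takeOut) swapIn cp.2
        · exact le_rfl
      rw [← hcpdef] at h1
      simp at h1
      omega
    rcases hcq2 : cq.2 with _ | ⟨x, t'⟩
    · -- the suffix is exhausted: one more vacuous pass of A's loop, both sides stop
      have hQlen : Q.2 = Q.1.length := by
        have := hQdrop
        rw [hcq2] at this
        have := congrArg List.length this
        simp at this
        omega
      rw [nuclearLoopA, dif_neg (by omega)]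
      have := List.take_append_drop Q.2 Q.1
      rw [hQtake, hQdrop, hcq2] at this
      rw [← this]
      simp
    · -- one character moves across; the rest is the induction hypothesis
      have hxt : Q.1.drop Q.2 = x :: t' := by rw [hQdrop, hcq2]
      have hlt : Q.2 < Q.1.length := by
        have := congrArg List.length hxt
        simp at this
        omega
      have hn' : t'.length + 1 ≤ n := by
        have := congrArg List.length hcq2
        simp at this
        omega
      rw [ihn t'.length (by omega) Q.1 (Q.2 + 1) (by omega) (by
        have := congrArg List.length hxt
        simp at this
        omega)]
      have htake : Q.1.take (Q.2 + 1) = s.take i ++ cp.1 ++ cq.1 ++ [x] := by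
        rw [List.take_add, hQtake]
        have : (Q.1.drop Q.2).take 1 = [x] := by rw [hxt]; simp
        rw [this]
      have hdrop : Q.1.drop (Q.2 + 1) = t' := by
        rw [List.drop_add_one_eq_tail_drop, hxt]
        rfl
      rw [htake, hdrop]
      simp

-- B's loop flattens to core, with the buffer already flattened in front
theorem loopB_core (takeOut cap swapIn : List Char) (merc : Bool) :
    ∀ (s : List Char) (j : Nat) (out : List (List Char)),
      (nuclearLoopB takeOut cap swapIn merc s j out).flatten
        = out.flatten ++ core takeOut cap swapIn merc (s.drop j) := by
  intro s j out
  refine nuclearLoopB.induct takeOut cap swapIn merc s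
    (motive := fun j out =>
      (nuclearLoopB takeOut cap swapIn merc s j out).flatten
        = out.flatten ++ core takeOut cap swapIn merc (s.drop j)) ?_ ?_ j out
  · intro j out
    simp only [Bool.and_eq_true, dite_eq_ite]
    intro hstop
    rw [nuclearLoopB, core]
    simp only [coreStep, Bool.and_eq_true, List.drop_drop, List.isEmpty_iff, Nat.add_comm]
      at hstop ⊢
    split_ifs at hstop ⊢ <;> simp_all [List.flatten_append] <;> omega
  · intro j out
    simp only [Bool.and_eq_true, dite_eq_ite]
    intro hgo ih
    rw [nuclearLoopB, core]
    simp only [coreStep, Bool.and_eq_true, List.drop_drop, List.isEmpty_iff, Nat.add_comm]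
      at hgo ih ⊢
    split_ifs at hgo ih ⊢ <;> simp_all [List.flatten_append] <;> (try omega) <;>
      first
        | exact ⟨congrArg (fun k => (List.drop k s).headI) (by omega),
            congrArg (fun k => core takeOut cap swapIn _ (List.drop k s)) (by omega)⟩
        | exact congrArg (fun k => core takeOut cap swapIn _ (List.drop k s)) (by omega)

-- ===== VERDICT (by name: the statement is the Claim_ definition above) =====
theorem nuclearProtocol_spec : Claim_equal_nuclearProtocol := by
  intro m t w n _
  unfold Spec_nuclearProtocol nuclearProtocol nuclearProtocol_alt
  rw [join_nil_flatten,
    loopB_core t.toList (pyCapitalize t.toList) w.toList (n == "Y") m.toList 0 [],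
    loopA_core t.toList w.toList (n == "Y") m.toList.length m.toList 0 (by simp) (by simp)]
  simp
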